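-- pv_equiv track=rewrite | github.com/pzread/unstrip | anal.py | blkcost
-- ===== SOURCE A (Python) =====
-- def blkcost(a = None,b = None):
--     assert(a != None or b != None)
--
--     if a == None or b == None:
--         if a == None:
--             x = b
--         if b == None:
--             x = a
--         cost = 0
--         for ins in x:
--             cost += inscost(ins,None)
--         return cost
--
--     return distance(a,b,inscost,max(len(a),len(b)) * 8)
--
-- def inscost(a = None,b = None):
--     if a == None or b == None:
--         return 4
--     if a[0] != b[0]:
--         return 4
--     opa = a[1]
--     opb = b[1]
--     if len(opa) != len(opb):
--         return 4
--     cost = 0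
--     for x,y in zip(opa,opb):
--         if x[0] != y[0]:
--             cost = max(cost,2)
--         for pa,pb in zip(x[1:],y[1:]):
--             if pa != pb:
--                 cost = max(cost,1)
--                 break
--     return cost
--
-- def distance(obja,objb,costfunc,limit):
--     dp = list()
--     for i in range(len(obja) + 1):
--         col = list()
--         for j in range(len(objb) + 1):
--             col.append(-1)
--         dp.append(col)
--
--     dp[0][0] = 0
--     for i in range(1,len(obja) + 1):
--         dp[i][0] = dp[i - 1][0] + costfunc(obja[i - 1],None)
--     for i in range(1,len(objb) + 1):
--         dp[0][i] = dp[0][i - 1] + costfunc(None,objb[i - 1])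
--
--     for i in range(1,len(obja) + 1):
--         for j in range(1,len(objb) + 1):
--             if min(dp[i - 1][j - 1],dp[i - 1][j],dp[i][j - 1]) > limit:
--                 dp[i][j] = 10 ** 9
--             else:
--                 dp[i][j] = min(
--                         dp[i - 1][j - 1] + costfunc(obja[i - 1],objb[j - 1]),
--                         dp[i - 1][j] + costfunc(obja[i - 1],None),
--                         dp[i][j - 1] + costfunc(None,objb[j - 1]))
--     return dp[-1][-1]
-- ===== SOURCE B (Python) =====
-- def blkcost(a = None, b = None):
--     assert(a != None or b != None)
--     # inserting or deleting any instruction costs a flat 4, so a missing side is 4 per instruction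
--     if a is None:
--         return 4 * len(b)
--     if b is None:
--         return 4 * len(a)
--     # demand-driven memoized evaluation of the edit-distance recurrence, with an
--     # explicit work stack (cell, expanded) instead of filling a table
--     memo = {}
--     stack = [(len(a), len(b), False)]
--     while stack:
--         i, j, expanded = stack.pop()
--         if (i, j) in memo:
--             continue
--         if i == 0 or j == 0:
--             memo[(i, j)] = 4 * (i + j)
--             continue
--         if not expanded:
--             stack.append((i, j, True))
--             stack.append((i - 1, j - 1, False))
--             stack.append((i - 1, j, False))
--             stack.append((i, j - 1, False))
--         else:
--             memo[(i, j)] = min(memo[(i - 1, j - 1)] + subcost(a[i - 1], b[j - 1]),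
--                                memo[(i - 1, j)] + 4,
--                                memo[(i, j - 1)] + 4)
--     return memo[(len(a), len(b))]
--
-- def subcost(x, y):
--     # inscost specialised to two present instructions
--     if x[0] != y[0]:
--         return 4
--     opx = x[1]
--     opy = y[1]
--     if len(opx) != len(opy):
--         return 4
--     cost = 0
--     for u, v in zip(opx, opy):
--         if u[0] != v[0]:
--             cost = max(cost, 2)
--         for pu, pv in zip(u[1:], v[1:]):
--             if pu != pv:
--                 cost = max(cost, 1)
--                 break
--     return cost
-- ===== Notes on version B (the rewrite author's own statement) =====
-- stated objective: alternative
-- what changed: Replaces A's bottom-up (n+1)x(m+1) DP table with its limit/10**9 sentinel and first-row/column loops by a demand-driven memoized evaluation of the recurrence using an explicit work stack and a memo dict, exploiting the flat indel cost 4 for closed-form base cases 4*(i+j) and a 4*len closed form for the None branch; inscost is specialised to the two-present-instructions case.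
import Mathlib
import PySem

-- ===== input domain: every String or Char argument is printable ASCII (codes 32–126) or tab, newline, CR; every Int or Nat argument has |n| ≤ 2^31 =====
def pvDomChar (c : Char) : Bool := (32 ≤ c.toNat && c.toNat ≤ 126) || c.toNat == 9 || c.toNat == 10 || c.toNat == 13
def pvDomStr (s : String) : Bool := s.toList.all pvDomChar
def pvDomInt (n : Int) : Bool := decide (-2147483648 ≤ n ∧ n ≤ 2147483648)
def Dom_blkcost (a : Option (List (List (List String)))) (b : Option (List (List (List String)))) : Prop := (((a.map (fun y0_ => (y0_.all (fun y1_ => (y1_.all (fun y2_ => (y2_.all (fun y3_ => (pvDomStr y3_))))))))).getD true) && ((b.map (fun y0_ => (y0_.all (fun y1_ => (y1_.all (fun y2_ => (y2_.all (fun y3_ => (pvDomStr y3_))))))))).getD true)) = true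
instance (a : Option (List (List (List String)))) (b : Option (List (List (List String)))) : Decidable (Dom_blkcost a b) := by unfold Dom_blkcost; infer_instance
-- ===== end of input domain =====

-- B replaces A's bottom-up DP table (with its never-firing limit sentinel) by a demand-driven
-- memoized evaluation with an explicit work stack and memo dict, closed-form 4*(i+j) base rows
-- and a 4*len closed form for the one-sided branch (objective: alternative, same asymptotics).

-- ===== PORT A =====
-- inscost as A has it (both-None and one-None branches included).
-- The inner 'for pa,pb in zip(x[1:],y[1:]): if pa != pb: cost = max(cost,1); break' sets cost
-- at the first mismatching pair and leaves the loop, i.e. bumps cost iff some zipped pair differs.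
-- String s[1:] is ported as s.toList.drop 1 (exact: Python's slice past the end is empty).
def inscostFn (a : Option (List (List String))) (b : Option (List (List String))) : Int :=
  match a, b with
  | none, _ => 4
  | _, none => 4
  | some a, some b =>
    -- Python a[0] / b[0] raise IndexError on an empty instruction; such inputs are outside Pre_
    if PySem.List.pyGet? a 0 ≠ PySem.List.pyGet? b 0 then 4
    else
      let opa := (PySem.List.pyGet? a 1).getD []
      let opb := (PySem.List.pyGet? b 1).getD []
      if opa.length ≠ opb.length then 4
      else
        (opa.zip opb).foldl (fun cost p =>
          let cost := if PySem.Str.pyGet? p.1 0 ≠ PySem.Str.pyGet? p.2 0 then max cost 2 else cost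
          if ((p.1.toList.drop 1).zip (p.2.toList.drop 1)).any (fun q => q.1 ≠ q.2)
          then max cost 1 else cost) 0

def tgetA (dp : List (List Int)) (i j : Nat) : Int := (dp.getD i []).getD j 0
def tsetA (dp : List (List Int)) (i j : Nat) (v : Int) : List (List Int) :=
  dp.set i ((dp.getD i []).set j v)

-- one cell of A's main double loop (dp[i][j] with the limit sentinel), then one row of it
def cellStep (obja objb : List (List (List String))) (limit : Int) (i : Nat)
    (dp : List (List Int)) (j : Nat) : List (List Int) :=
  if limit < min (min (tgetA dp (i-1) (j-1)) (tgetA dp (i-1) j)) (tgetA dp i (j-1))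
  then tsetA dp i j (10 ^ 9)
  else tsetA dp i j (min (min
        (tgetA dp (i-1) (j-1) + inscostFn (some (obja.getD (i-1) [])) (some (objb.getD (j-1) [])))
        (tgetA dp (i-1) j + inscostFn (some (obja.getD (i-1) [])) none))
        (tgetA dp i (j-1) + inscostFn none (some (objb.getD (j-1) []))))

def rowStep (obja objb : List (List (List String))) (limit : Int)
    (dp : List (List Int)) (i : Nat) : List (List Int) :=
  (List.range' 1 objb.length).foldl (cellStep obja objb limit i) dp

def distanceA (obja objb : List (List (List String))) (limit : Int) : Int :=
  let dp0 : List (List Int) :=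
    (List.range (obja.length + 1)).map (fun _ => (List.range (objb.length + 1)).map (fun _ => (-1 : Int)))
  let dp1 := tsetA dp0 0 0 0
  let dp2 := (List.range' 1 obja.length).foldl
    (fun dp i => tsetA dp i 0 (tgetA dp (i-1) 0 + inscostFn (some (obja.getD (i-1) [])) none)) dp1
  let dp3 := (List.range' 1 objb.length).foldl
    (fun dp j => tsetA dp 0 j (tgetA dp 0 (j-1) + inscostFn none (some (objb.getD (j-1) [])))) dp2
  let dp4 := (List.range' 1 obja.length).foldl (rowStep obja objb limit) dp3
  tgetA dp4 obja.length objb.length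

def blkcost (a : Option (List (List (List String)))) (b : Option (List (List (List String)))) : Int :=
  match a, b with
  | none, none => 0      -- Python: assert fails (excluded by Pre_)
  | none, some x => x.foldl (fun cost ins => cost + inscostFn (some ins) none) 0
  | some x, none => x.foldl (fun cost ins => cost + inscostFn (some ins) none) 0
  | some aL, some bL => distanceA aL bL ((max aL.length bL.length : Nat) * 8)

-- ===== PORT B =====
-- subcost: inscost specialised to two present instructions (Source B keeps its own copy)
def subcostFn (a : List (List String)) (b : List (List String)) : Int :=
  if PySem.List.pyGet? a 0 ≠ PySem.List.pyGet? b 0 then 4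
  else
    let opa := (PySem.List.pyGet? a 1).getD []
    let opb := (PySem.List.pyGet? b 1).getD []
    if opa.length ≠ opb.length then 4
    else
      (opa.zip opb).foldl (fun cost p =>
        let cost := if PySem.Str.pyGet? p.1 0 ≠ PySem.Str.pyGet? p.2 0 then max cost 2 else cost
        if ((p.1.toList.drop 1).zip (p.2.toList.drop 1)).any (fun q => q.1 ≠ q.2)
        then max cost 1 else cost) 0

-- weight of a stack entry: the termination measure of B's while loop
def wB (e : (Nat × Nat) × Bool) : Nat :=
  if e.2 then 5 ^ (e.1.1 + e.1.2) else 5 ^ (e.1.1 + e.1.2 + 1)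

-- B's while loop: pop (i,j,expanded); skip if memoized; closed-form base 4*(i+j);
-- unexpanded cells push themselves (expanded) and their three dependencies; expanded
-- cells combine the memoized dependencies.  Head of the Lean list = top of the stack.
def loopB (aL bL : List (List (List String))) (stack : List ((Nat × Nat) × Bool))
    (memo : PySem.Dict (Nat × Nat) Int) : PySem.Dict (Nat × Nat) Int :=
  match stack with
  | [] => memo
  | ((i, j), exp) :: rest =>
    if (memo.get? (i, j)).isSome then loopB aL bL rest memo
    else if i = 0 ∨ j = 0 then loopB aL bL rest (memo.insert (i, j) (4 * ((i : Int) + (j : Int))))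
    else if exp then
      loopB aL bL rest (memo.insert (i, j)
        (min (min (memo.getD (i - 1, j - 1) 0 + subcostFn (aL.getD (i - 1) []) (bL.getD (j - 1) []))
                  (memo.getD (i - 1, j) 0 + 4))
             (memo.getD (i, j - 1) 0 + 4)))
    else
      loopB aL bL (((i, j - 1), false) :: ((i - 1, j), false) :: ((i - 1, j - 1), false)
        :: ((i, j), true) :: rest) memo
  termination_by (stack.map wB).sum
  decreasing_by
  · have h0 : 0 < wB ((i, j), exp) := by unfold wB; split <;> positivity
    simp only [List.map_cons, List.sum_cons]; omega
  · have h0 : 0 < wB ((i, j), exp) := by unfold wB; split <;> positivity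
    simp only [List.map_cons, List.sum_cons]; omega
  · have h0 : 0 < wB ((i, j), exp) := by unfold wB; split <;> positivity
    simp only [List.map_cons, List.sum_cons]; omega
  · rename_i hmem hij hexp
    have hi : 1 ≤ i := by omega
    have hj : 1 ≤ j := by omega
    simp only [List.map_cons, List.sum_cons, wB, if_pos rfl, if_neg, Bool.false_eq_true,
      not_false_eq_true, if_true, if_false]
    have e1 : i + (j - 1) + 1 = i + j := by omega
    have e2 : i - 1 + j + 1 = i + j := by omega
    have e3 : i - 1 + (j - 1) + 1 = i + j - 1 := by omega
    have e4 : exp = false := by simpa using hexp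
    rw [e1, e2, e3, e4]
    simp only [Bool.false_eq_true, if_false, if_pos rfl]
    have h5 : 5 ^ (i + j - 1) ≤ 5 ^ (i + j) := Nat.pow_le_pow_right (by norm_num) (by omega)
    have h6 : 5 ^ (i + j + 1) = 5 * 5 ^ (i + j) := by rw [Nat.pow_succ]; ring
    have h7 : 1 ≤ 5 ^ (i + j) := Nat.one_le_two_pow.trans (Nat.pow_le_pow_left (by norm_num) _)
    omega

def blkcost_alt (a : Option (List (List (List String)))) (b : Option (List (List (List String)))) : Int :=
  match a, b with
  | none, none => 0      -- Python: assert fails (excluded by Pre_)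
  | none, some x => 4 * (x.length : Int)
  | some x, none => 4 * (x.length : Int)
  | some aL, some bL =>
      (loopB aL bL [((aL.length, bL.length), false)] PySem.Dict.empty).getD (aL.length, bL.length) 0

-- ===== PRECONDITION & SPEC =====
-- Pre_ excludes exactly the inputs on which the Python A raises: both arguments None (the
-- assert fails), and pairs of instructions on which inscost raises IndexError (an empty
-- instruction, a single-element instruction whose head equals the other's head, or an empty
-- operand string reached by the operand loop).  A returns normally on every other input.
def insPairOKb (x y : List (List String)) : Bool :=
  !x.isEmpty && !y.isEmpty &&
  (x.head? != y.head? ||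
    (decide (2 ≤ x.length) && decide (2 ≤ y.length) &&
      ((x.getD 1 []).length != (y.getD 1 []).length ||
        ((x.getD 1 []).zip (y.getD 1 [])).all (fun p => p.1 != "" && p.2 != ""))))

def Pre_blkcost (a : Option (List (List (List String)))) (b : Option (List (List (List String)))) : Prop :=
  ((a.isSome || b.isSome) &&
    (a.getD []).all (fun x => (b.getD []).all (fun y => insPairOKb x y))) = true
instance (a : Option (List (List (List String)))) (b : Option (List (List (List String)))) : Decidable (Pre_blkcost a b) := by unfold Pre_blkcost; infer_instance

def pvWitness_blkcost : Option (List (List (List String))) × Option (List (List (List String))) :=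
  (some [[["mov"], ["ax", "bx"]]], some [[["add"], ["ax", "1"]]])

def Spec_blkcost (a : Option (List (List (List String)))) (b : Option (List (List (List String)))) (out : Int) : Prop := out = blkcost_alt a b
instance (a : Option (List (List (List String)))) (b : Option (List (List (List String)))) (out : Int) : Decidable (Spec_blkcost a b out) := by unfold Spec_blkcost; infer_instance

-- ===== CLAIM (what is proved, stated in full; the proofs are below) =====
def Claim_equal_blkcost : Prop := ∀ (a : Option (List (List (List String)))) (b : Option (List (List (List String)))), Dom_blkcost a b → Pre_blkcost a b → Spec_blkcost a b (blkcost a b)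

-- ===== LEMMAS AND PROOFS =====

-- the common mathematical recurrence both programs compute (deletion/insertion cost is 4:
-- inscost with a None argument returns 4 definitionally)
def subC (aL bL : List (List (List String))) (i j : Nat) : Int :=
  inscostFn (some (aL.getD i [])) (some (bL.getD j []))

def dSpec (aL bL : List (List (List String))) : Nat → Nat → Int
  | 0, 0 => 0
  | i+1, 0 => dSpec aL bL i 0 + 4
  | 0, j+1 => dSpec aL bL 0 j + 4
  | i+1, j+1 => min (min (dSpec aL bL i j + subC aL bL i j)
                         (dSpec aL bL i (j+1) + 4))
                    (dSpec aL bL (i+1) j + 4)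
  termination_by i j => (i, j)

theorem inscost_none_left (y : Option (List (List String))) : inscostFn none y = 4 := rfl
theorem inscost_some_none (x : List (List String)) : inscostFn (some x) none = 4 := rfl
theorem subcost_eq (x y : List (List String)) : subcostFn x y = inscostFn (some x) (some y) := rfl

-- every dSpec value is at most 4·(i+j): the reason A's limit sentinel never fires
theorem dSpec_le (aL bL : List (List (List String))) : ∀ i j, dSpec aL bL i j ≤ 4 * (i + j : Int) := by
  intro i j
  fun_induction dSpec aL bL i j with
  | case1 => simp
  | case2 i ih => push_cast; omega
  | case3 j ih => push_cast; omega
  | case4 i j ih1 ih2 ih3 =>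
    have h : min (min (dSpec aL bL i j + subC aL bL i j) (dSpec aL bL i (j+1) + 4)) (dSpec aL bL (i+1) j + 4) ≤ dSpec aL bL i (j+1) + 4 :=
      le_trans (min_le_left _ _) (min_le_right _ _)
    push_cast at *; omega

theorem tget_tset_self (dp : List (List Int)) (i j : Nat) (v : Int)
    (hi : i < dp.length) (hj : j < (dp.getD i []).length) :
    tgetA (tsetA dp i j v) i j = v := by
  have hj' : j < (dp[i]?.getD (α := List Int) []).length := by
    simpa [List.getD_eq_getElem?_getD] using hj
  simp only [tgetA, tsetA, List.getD_eq_getElem?_getD, List.getElem?_set_self hi]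
  simp [List.getElem?_set_self hj']

theorem tget_tset_ne (dp : List (List Int)) (i j : Nat) (v : Int) (i' j' : Nat)
    (h : i ≠ i' ∨ j ≠ j') : tgetA (tsetA dp i j v) i' j' = tgetA dp i' j' := by
  unfold tgetA tsetA
  simp only [List.getD_eq_getElem?_getD]
  rcases h with h | h
  · rw [List.getElem?_set_ne h]
  · by_cases hii : i = i'
    · subst hii
      by_cases hlen : i < dp.length
      · rw [List.getElem?_set_self hlen]
        simp only [Option.getD_some]
        rw [List.getElem?_set_ne h]
      · rw [List.set_eq_of_length_le (by omega)]
    · rw [List.getElem?_set_ne hii]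

def shapeOK (la lb : Nat) (dp : List (List Int)) : Prop :=
  dp.length = la + 1 ∧ ∀ r ∈ dp, r.length = lb + 1
theorem shape_rowlen (la lb : Nat) (dp : List (List Int)) (i : Nat)
    (h : shapeOK la lb dp) (hi : i ≤ la) : (dp.getD i []).length = lb + 1 := by
  obtain ⟨h1, h2⟩ := h
  have hlt : i < dp.length := by omega
  rw [List.getD_eq_getElem?_getD, List.getElem?_eq_getElem hlt]
  exact h2 _ (List.getElem_mem hlt)

theorem shape_tset (la lb : Nat) (dp : List (List Int)) (i j : Nat) (v : Int)
    (h : shapeOK la lb dp) : shapeOK la lb (tsetA dp i j v) := by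
  obtain ⟨h1, h2⟩ := h
  by_cases hi : i < dp.length
  · refine ⟨by simp [tsetA, h1], ?_⟩
    intro r hr
    rcases List.mem_or_eq_of_mem_set hr with hr | hr
    · exact h2 _ hr
    · subst hr
      rw [List.length_set, List.getD_eq_getElem?_getD, List.getElem?_eq_getElem hi]
      exact h2 _ (List.getElem_mem hi)
  · unfold tsetA
    rw [List.set_eq_of_length_le (by omega)]
    exact ⟨h1, h2⟩

def Good (aL bL : List (List (List String))) (i k : Nat) (dp : List (List Int)) : Prop :=
  shapeOK aL.length bL.length dp ∧
  ∀ i' j', i' ≤ aL.length → j' ≤ bL.length →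
    (i' = 0 ∨ j' = 0 ∨ i' < i ∨ (i' = i ∧ j' ≤ k)) →
    tgetA dp i' j' = dSpec aL bL i' j'

theorem phase2_ok (aL bL : List (List (List String))) (k : Nat) (hk : k ≤ aL.length) :
    shapeOK aL.length bL.length ((List.range' 1 k).foldl
      (fun dp i => tsetA dp i 0 (tgetA dp (i-1) 0 + inscostFn (some (aL.getD (i-1) [])) none))
      (tsetA ((List.range (aL.length + 1)).map (fun _ => (List.range (bL.length + 1)).map (fun _ => (-1 : Int)))) 0 0 0)) ∧
    ∀ i ≤ k, tgetA ((List.range' 1 k).foldl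
      (fun dp i => tsetA dp i 0 (tgetA dp (i-1) 0 + inscostFn (some (aL.getD (i-1) [])) none))
      (tsetA ((List.range (aL.length + 1)).map (fun _ => (List.range (bL.length + 1)).map (fun _ => (-1 : Int)))) 0 0 0)) i 0 = dSpec aL bL i 0 := by
  induction k with
  | zero =>
    simp only [List.range'_zero, List.foldl_nil]
    have hs0 : shapeOK aL.length bL.length ((List.range (aL.length + 1)).map (fun _ => (List.range (bL.length + 1)).map (fun _ => (-1 : Int)))) := by
      constructor
      · simp
      · intro r hr
        rw [List.mem_map] at hr
        obtain ⟨x, -, hr⟩ := hr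
        simp [← hr]
    refine ⟨shape_tset _ _ _ _ _ _ hs0, ?_⟩
    intro i hi
    have hi0 : i = 0 := by omega
    subst hi0
    rw [tget_tset_self _ _ _ _ (by simp) (by rw [shape_rowlen _ _ _ _ hs0 (by omega)]; omega)]
    simp [dSpec]
  | succ n ih =>
    obtain ⟨ihs, ihv⟩ := ih (by omega)
    rw [List.range'_concat, List.foldl_append]
    set F := (List.range' 1 n).foldl _ _ with hF
    simp only [List.foldl_cons, List.foldl_nil]
    have hn1 : 1 + 1 * n = n + 1 := by omega
    rw [hn1]
    have hval : tgetA F (n + 1 - 1) 0 + inscostFn (some (aL.getD (n + 1 - 1) [])) none = dSpec aL bL (n+1) 0 := by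
      simp only [Nat.add_sub_cancel, inscost_some_none]
      rw [ihv n (by omega)]
      rw [dSpec]
    rw [hval]
    refine ⟨shape_tset _ _ _ _ _ _ ihs, ?_⟩
    intro i hi
    rcases Nat.lt_or_ge i (n+1) with h | h
    · rw [tget_tset_ne _ _ _ _ _ _ (Or.inl (by omega))]
      exact ihv i (by omega)
    · have : i = n + 1 := by omega
      subst this
      rw [tget_tset_self _ _ _ _ (by rw [ihs.1]; omega)
        (by rw [shape_rowlen _ _ _ _ ihs (by omega)]; omega)]

theorem phase3_ok (aL bL : List (List (List String))) (dp : List (List Int))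
    (hs : shapeOK aL.length bL.length dp)
    (hcol : ∀ i ≤ aL.length, tgetA dp i 0 = dSpec aL bL i 0) :
    ∀ k, k ≤ bL.length →
    shapeOK aL.length bL.length ((List.range' 1 k).foldl
      (fun dp j => tsetA dp 0 j (tgetA dp 0 (j-1) + inscostFn none (some (bL.getD (j-1) [])))) dp) ∧
    (∀ i ≤ aL.length, tgetA ((List.range' 1 k).foldl
      (fun dp j => tsetA dp 0 j (tgetA dp 0 (j-1) + inscostFn none (some (bL.getD (j-1) [])))) dp) i 0 = dSpec aL bL i 0) ∧
    (∀ j ≤ k, tgetA ((List.range' 1 k).foldl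
      (fun dp j => tsetA dp 0 j (tgetA dp 0 (j-1) + inscostFn none (some (bL.getD (j-1) [])))) dp) 0 j = dSpec aL bL 0 j) := by
  intro k
  induction k with
  | zero =>
    intro _
    simp only [List.range'_zero, List.foldl_nil]
    exact ⟨hs, hcol, fun j hj => by
      have : j = 0 := by omega
      subst this; exact hcol 0 (by omega)⟩
  | succ n ih =>
    intro hk
    obtain ⟨ihs, ihc, ihv⟩ := ih (by omega)
    rw [List.range'_concat, List.foldl_append]
    set F := (List.range' 1 n).foldl _ dp with hF
    simp only [List.foldl_cons, List.foldl_nil]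
    have hn1 : 1 + 1 * n = n + 1 := by omega
    rw [hn1]
    have hval : tgetA F 0 (n + 1 - 1) + inscostFn none (some (bL.getD (n + 1 - 1) [])) = dSpec aL bL 0 (n+1) := by
      simp only [Nat.add_sub_cancel]
      rw [ihv n (by omega), inscost_none_left, dSpec]
    rw [hval]
    refine ⟨shape_tset _ _ _ _ _ _ ihs, ?_, ?_⟩
    · intro i hi
      rw [tget_tset_ne _ _ _ _ _ _ (Or.inr (by omega))]
      exact ihc i hi
    · intro j hj
      rcases Nat.lt_or_ge j (n+1) with h | h
      · rw [tget_tset_ne _ _ _ _ _ _ (Or.inr (by omega))]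
        exact ihv j (by omega)
      · have : j = n + 1 := by omega
        subst this
        rw [tget_tset_self _ _ _ _ (by rw [ihs.1]; omega)
          (by rw [shape_rowlen _ _ _ _ ihs (by omega)]; omega)]

theorem inner_ok (aL bL : List (List (List String))) (m : Nat) (hm : m + 1 ≤ aL.length)
    (dp : List (List Int)) (hg : Good aL bL (m+1) 0 dp) :
    ∀ k, k ≤ bL.length →
    Good aL bL (m+1) k ((List.range' 1 k).foldl
      (cellStep aL bL ((max aL.length bL.length : Nat) * 8) (m+1)) dp) := by
  intro k
  induction k with
  | zero =>
    intro _
    simpa only [List.range'_zero, List.foldl_nil] using hg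
  | succ n ih =>
    intro hk
    obtain ⟨ihs, ihv⟩ := ih (by omega)
    rw [List.range'_concat, List.foldl_append]
    set F := (List.range' 1 n).foldl _ dp with hF
    simp only [List.foldl_cons, List.foldl_nil]
    have hn1 : 1 + 1 * n = n + 1 := by omega
    rw [hn1]
    have e1 : tgetA F m n = dSpec aL bL m n :=
      ihv m n (by omega) (by omega) (by omega)
    have e2 : tgetA F m (n+1) = dSpec aL bL m (n+1) :=
      ihv m (n+1) (by omega) (by omega) (by omega)
    have e3 : tgetA F (m+1) n = dSpec aL bL (m+1) n :=
      ihv (m+1) n (by omega) (by omega) (by omega)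
    have hcell : cellStep aL bL ((max aL.length bL.length : Nat) * 8) (m+1) F (n+1)
        = tsetA F (m+1) (n+1) (dSpec aL bL (m+1) (n+1)) := by
      unfold cellStep
      simp only [Nat.add_sub_cancel, e1, e2, e3]
      rw [if_neg, inscost_some_none, inscost_none_left]
      · have hv : dSpec aL bL (m+1) (n+1) = min (min (dSpec aL bL m n + subC aL bL m n)
            (dSpec aL bL m (n+1) + 4)) (dSpec aL bL (m+1) n + 4) := by rw [dSpec]
        simp only [subC] at hv
        rw [← hv]
      · push Not
        have h1 : min (min (dSpec aL bL m n) (dSpec aL bL m (n+1))) (dSpec aL bL (m+1) n)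
            ≤ dSpec aL bL m n := le_trans (min_le_left _ _) (min_le_left _ _)
        have h2 := dSpec_le aL bL m n
        have h3 : (aL.length : Int) ≤ max (aL.length : Int) (bL.length : Int) := le_max_left _ _
        have h4 : (bL.length : Int) ≤ max (aL.length : Int) (bL.length : Int) := le_max_right _ _
        have h5 : (m : Int) + 1 ≤ aL.length := by exact_mod_cast hm
        have h6 : (n : Int) + 1 ≤ bL.length := by exact_mod_cast hk
        push_cast
        push_cast at h2
        linarith
    rw [hcell]
    refine ⟨shape_tset _ _ _ _ _ _ ihs, ?_⟩
    intro i' j' hi' hj' hcond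
    by_cases hij : i' = m + 1 ∧ j' = n + 1
    · obtain ⟨hi0, hj0⟩ := hij
      subst hi0; subst hj0
      rw [tget_tset_self _ _ _ _ (by rw [ihs.1]; omega)
        (by rw [shape_rowlen _ _ _ _ ihs (by omega)]; omega)]
    · rw [tget_tset_ne _ _ _ _ _ _ (by omega)]
      apply ihv i' j' hi' hj'
      rcases hcond with h | h | h | ⟨h1, h2⟩
      · exact Or.inl h
      · exact Or.inr (Or.inl h)
      · exact Or.inr (Or.inr (Or.inl h))
      · exact Or.inr (Or.inr (Or.inr ⟨h1, by omega⟩))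

theorem good_succ (aL bL : List (List (List String))) (i : Nat) (dp : List (List Int))
    (h : Good aL bL i bL.length dp) : Good aL bL (i+1) 0 dp := by
  obtain ⟨hs, hv⟩ := h
  refine ⟨hs, ?_⟩
  intro i' j' hi' hj' hcond
  apply hv i' j' hi' hj'
  rcases hcond with h | h | h | ⟨h1, h2⟩
  · exact Or.inl h
  · exact Or.inr (Or.inl h)
  · rcases Nat.lt_or_ge i' i with hh | hh
    · exact Or.inr (Or.inr (Or.inl hh))
    · exact Or.inr (Or.inr (Or.inr ⟨by omega, by omega⟩))
  · exact Or.inr (Or.inl (by omega))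

theorem outer_ok (aL bL : List (List (List String))) (dp : List (List Int))
    (hg : Good aL bL 1 0 dp) :
    ∀ k, k ≤ aL.length →
    Good aL bL (k+1) 0 ((List.range' 1 k).foldl
      (rowStep aL bL ((max aL.length bL.length : Nat) * 8)) dp) := by
  intro k
  induction k with
  | zero =>
    intro _
    simpa only [List.range'_zero, List.foldl_nil] using hg
  | succ n ih =>
    intro hk
    rw [List.range'_concat, List.foldl_append]
    set F := (List.range' 1 n).foldl _ dp with hF
    simp only [List.foldl_cons, List.foldl_nil]
    have hn1 : 1 + 1 * n = n + 1 := by omega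
    rw [hn1]
    apply good_succ
    exact inner_ok aL bL n hk F (ih (by omega)) bL.length (le_refl _)

theorem distanceA_eq (aL bL : List (List (List String))) :
    distanceA aL bL ((max aL.length bL.length : Nat) * 8) = dSpec aL bL aL.length bL.length := by
  unfold distanceA rowStep
  obtain ⟨h2s, h2v⟩ := phase2_ok aL bL aL.length (le_refl _)
  obtain ⟨h3s, h3c, h3v⟩ := phase3_ok aL bL _ h2s h2v bL.length (le_refl _)
  have hg1 : Good aL bL 1 0 ((List.range' 1 bL.length).foldl
      (fun dp j => tsetA dp 0 j (tgetA dp 0 (j-1) + inscostFn none (some (bL.getD (j-1) []))))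
      ((List.range' 1 aL.length).foldl
        (fun dp i => tsetA dp i 0 (tgetA dp (i-1) 0 + inscostFn (some (aL.getD (i-1) [])) none))
        (tsetA ((List.range (aL.length + 1)).map (fun _ => (List.range (bL.length + 1)).map (fun _ => (-1 : Int)))) 0 0 0))) := by
    refine ⟨h3s, ?_⟩
    intro i' j' hi' hj' hcond
    rcases hcond with h | h | h | ⟨h1, h2⟩
    · subst h; exact h3v j' hj'
    · subst h; exact h3c i' hi'
    · have : i' = 0 := by omega
      subst this; exact h3v j' hj'
    · have : j' = 0 := by omega
      subst this; exact h3c i' hi'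
  have hfin := outer_ok aL bL _ hg1 aL.length (le_refl _)
  exact hfin.2 aL.length bL.length (le_refl _) (le_refl _) (Or.inr (Or.inr (Or.inl (by omega))))

-- ---------- B-side proof: the stack loop computes dSpec ----------

theorem dSpec_zero_left (aL bL : List (List (List String))) : ∀ j, dSpec aL bL 0 j = 4 * (j : Int) := by
  intro j
  induction j with
  | zero => simp [dSpec]
  | succ n ih => rw [dSpec, ih]; push_cast; ring

theorem dSpec_left_zero (aL bL : List (List (List String))) : ∀ i, dSpec aL bL i 0 = 4 * (i : Int) := by
  intro i
  induction i with
  | zero => simp [dSpec]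
  | succ n ih => rw [dSpec, ih]; push_cast; ring

-- dependencies of a cell
def depsB (k : Nat × Nat) : List (Nat × Nat) := [(k.1 - 1, k.2 - 1), (k.1 - 1, k.2), (k.1, k.2 - 1)]

-- every value stored in the memo is the dSpec value of its cell
def MGB (aL bL : List (List (List String))) (memo : PySem.Dict (Nat × Nat) Int) : Prop :=
  ∀ p v, memo.get? p = some v → v = dSpec aL bL p.1 p.2

-- stack well-formedness: the dependencies of an expanded entry are memoized or scheduled above it
def OkSB (memo : PySem.Dict (Nat × Nat) Int) : List (Nat × Nat) → List ((Nat × Nat) × Bool) → Prop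
  | _, [] => True
  | P, (k, exp) :: rest =>
    (exp = true → ∀ d ∈ depsB k, ((memo.get? d).isSome = true ∨ d ∈ P)) ∧ OkSB memo (k :: P) rest

theorem okS_mono (memo memo' : PySem.Dict (Nat × Nat) Int) (P P' : List (Nat × Nat))
    (s : List ((Nat × Nat) × Bool))
    (hm : ∀ k, (memo.get? k).isSome = true → (memo'.get? k).isSome = true)
    (hp : ∀ k ∈ P, k ∈ P' ∨ (memo'.get? k).isSome = true) :
    OkSB memo P s → OkSB memo' P' s := by
  induction s generalizing P P' with
  | nil => intro _; trivial
  | cons e rest ih =>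
    obtain ⟨k, exp⟩ := e
    intro ⟨h1, h2⟩
    refine ⟨?_, ih (k :: P) (k :: P') (fun d hd => ?_) h2⟩
    · intro he d hd
      rcases h1 he d hd with h | h
      · exact Or.inl (hm d h)
      · rcases hp d h with h' | h'
        · exact Or.inr h'
        · exact Or.inl h'
    · rcases List.mem_cons.mp hd with h | h
      · exact Or.inl (List.mem_cons.mpr (Or.inl h))
      · rcases hp d h with h' | h'
        · exact Or.inl (List.mem_cons.mpr (Or.inr h'))
        · exact Or.inr h'

theorem loop_main (aL bL : List (List (List String))) :
    ∀ (stack : List ((Nat × Nat) × Bool)) (memo : PySem.Dict (Nat × Nat) Int),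
    OkSB memo [] stack → MGB aL bL memo →
    MGB aL bL (loopB aL bL stack memo) ∧
    (∀ p v, memo.get? p = some v → (loopB aL bL stack memo).get? p = some v) ∧
    (∀ e ∈ stack, ((loopB aL bL stack memo).get? e.1).isSome = true) := by
  intro stack memo
  fun_induction loopB aL bL stack memo with
  | case1 memo => exact fun _ hmg => ⟨hmg, fun p v h => h, fun e he => absurd he (List.not_mem_nil)⟩
  | case2 memo i j exp rest hmem ih =>
    intro hok hmg
    obtain ⟨-, hrest⟩ := hok
    have hok' : OkSB memo [] rest :=
      okS_mono memo memo [(i, j)] [] rest (fun k h => h)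
        (fun k hk => by
          rcases List.mem_singleton.mp hk with h
          exact Or.inr (h ▸ hmem)) hrest
    obtain ⟨m1, m2, m3⟩ := ih hok' hmg
    refine ⟨m1, m2, ?_⟩
    intro e he
    rcases List.mem_cons.mp he with h | h
    · obtain ⟨v, hv⟩ := Option.isSome_iff_exists.mp hmem
      have := m2 _ _ hv
      rw [h]
      simp [this]
    · exact m3 e h
  | case3 memo i j exp rest hmem hij ih =>
    intro hok hmg
    obtain ⟨-, hrest⟩ := hok
    have hins : ∀ k, ((memo.insert (i, j) (4 * ((i : Int) + (j : Int)))).get? k).isSome = true ∨ True := fun _ => Or.inr trivial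
    have hget : ∀ p, (memo.insert (i, j) (4 * ((i : Int) + (j : Int)))).get? p
        = if p = (i, j) then some (4 * ((i : Int) + (j : Int))) else memo.get? p :=
      fun p => PySem.Dict.get?_insert _ _ _ _
    have hmg' : MGB aL bL (memo.insert (i, j) (4 * ((i : Int) + (j : Int)))) := by
      intro p v hv
      rw [hget p] at hv
      split at hv
      · rename_i hp
        subst hp
        obtain rfl := (Option.some.inj hv).symm
        rcases hij with h | h
        · subst h; rw [dSpec_zero_left]; push_cast; ring
        · subst h; rw [dSpec_left_zero]; push_cast; ring
      · exact hmg p v hv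
    have hok' : OkSB (memo.insert (i, j) (4 * ((i : Int) + (j : Int)))) [] rest := by
      apply okS_mono memo _ [(i, j)] [] rest
      · intro k hk
        rw [hget k]; split
        · rfl
        · exact hk
      · intro k hk
        rcases List.mem_singleton.mp hk with h
        subst h
        rw [hget (i, j)]
        simp
      · exact hrest
    obtain ⟨m1, m2, m3⟩ := ih hok' hmg'
    refine ⟨m1, ?_, ?_⟩
    · intro p v hv
      apply m2
      rw [hget p]
      split
      · rename_i hp
        subst hp
        rw [hv] at hmem
        simp at hmem
      · exact hv
    · intro e he
      rcases List.mem_cons.mp he with h | h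
      · have h0 : (memo.insert (i, j) (4 * ((i : Int) + (j : Int)))).get? (i, j)
            = some (4 * ((i : Int) + (j : Int))) := by rw [hget]; simp
        have := m2 _ _ h0
        rw [h]
        simp [this]
      · exact m3 e h
  | case4 memo i j rest hmem hij ih =>
    -- expanded pop: the dependencies are memoized; insert the combined value
    intro hok hmg
    obtain ⟨hd, hrest⟩ := hok
    have hdeps : ∀ d ∈ depsB (i, j), (memo.get? d).isSome = true := by
      intro d hdm
      rcases hd rfl d hdm with h | h
      · exact h
      · exact absurd h (List.not_mem_nil)
    set V := min (min (memo.getD (i - 1, j - 1) 0 + subcostFn (aL.getD (i - 1) []) (bL.getD (j - 1) []))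
                  (memo.getD (i - 1, j) 0 + 4))
             (memo.getD (i, j - 1) 0 + 4) with hV
    have hget : ∀ p, (memo.insert (i, j) V).get? p
        = if p = (i, j) then some V else memo.get? p :=
      fun p => PySem.Dict.get?_insert _ _ _ _
    have hdval : ∀ d ∈ depsB (i, j), memo.getD d 0 = dSpec aL bL d.1 d.2 := by
      intro d hdm
      obtain ⟨v, hv⟩ := Option.isSome_iff_exists.mp (hdeps d hdm)
      rw [PySem.Dict.getD_of_get?_eq_some _ 0 hv]
      exact hmg d v hv
    have hVd : V = dSpec aL bL i j := by
      obtain ⟨m, hm⟩ : ∃ m, i = m + 1 := ⟨i - 1, by omega⟩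
      obtain ⟨n, hn⟩ : ∃ n, j = n + 1 := ⟨j - 1, by omega⟩
      subst hm; subst hn
      have e1 := hdval (m, n) (by simp [depsB])
      have e2 := hdval (m, n + 1) (by simp [depsB])
      have e3 := hdval (m + 1, n) (by simp [depsB])
      simp only [Nat.add_sub_cancel] at e1 e2 e3 ⊢
      rw [hV]
      simp only [Nat.add_sub_cancel, e1, e2, e3]
      rw [subcost_eq]
      have hr : dSpec aL bL (m+1) (n+1) = min (min (dSpec aL bL m n + subC aL bL m n)
          (dSpec aL bL m (n+1) + 4)) (dSpec aL bL (m+1) n + 4) := by rw [dSpec]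
      rw [hr, subC]
    have hmg' : MGB aL bL (memo.insert (i, j) V) := by
      intro p v hv
      rw [hget p] at hv
      split at hv
      · rename_i hp
        subst hp
        obtain rfl := (Option.some.inj hv).symm
        exact hVd
      · exact hmg p v hv
    have hok' : OkSB (memo.insert (i, j) V) [] rest := by
      apply okS_mono memo _ [(i, j)] [] rest
      · intro k hk
        rw [hget k]; split
        · rfl
        · exact hk
      · intro k hk
        rcases List.mem_singleton.mp hk with h
        subst h
        rw [hget (i, j)]
        simp
      · exact hrest
    obtain ⟨m1, m2, m3⟩ := ih hok' hmg'
    refine ⟨m1, ?_, ?_⟩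
    · intro p v hv
      apply m2
      rw [hget p]
      split
      · rename_i hp
        subst hp
        rw [hv] at hmem
        simp at hmem
      · exact hv
    · intro e he
      rcases List.mem_cons.mp he with h | h
      · have h0 : (memo.insert (i, j) V).get? (i, j) = some V := by rw [hget]; simp
        have := m2 _ _ h0
        rw [h]
        simp [this]
      · exact m3 e h
  | case5 memo i j exp rest hmem hij hexp ih =>
    -- unexpanded pop: push the expanded entry and its three dependencies
    intro hok hmg
    obtain ⟨-, hrest⟩ := hok
    have hok' : OkSB memo [] (((i, j - 1), false) :: ((i - 1, j), false)
        :: ((i - 1, j - 1), false) :: ((i, j), true) :: rest) := by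
      refine ⟨by simp, by simp, by simp, ?_, ?_⟩
      · intro _ d hdm
        simp only [depsB, List.mem_cons, List.mem_singleton] at hdm
        rcases hdm with h | h | h | h
        · subst h; exact Or.inr (by simp)
        · subst h; exact Or.inr (by simp)
        · subst h; exact Or.inr (by simp)
        · exact absurd h (List.not_mem_nil)
      · apply okS_mono memo memo [(i, j)] _ rest (fun k h => h)
        · intro k hk
          rcases List.mem_singleton.mp hk with h
          subst h
          exact Or.inl (by simp)
        · exact hrest
    obtain ⟨m1, m2, m3⟩ := ih hok' hmg
    refine ⟨m1, m2, ?_⟩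
    intro e he
    rcases List.mem_cons.mp he with h | h
    · have := m3 ((i, j), true) (by simp)
      rw [h]
      simpa using this
    · exact m3 e (by simp [h])

theorem alt_some_some (aL bL : List (List (List String))) :
    blkcost_alt (some aL) (some bL) = dSpec aL bL aL.length bL.length := by
  show (loopB aL bL [((aL.length, bL.length), false)] PySem.Dict.empty).getD (aL.length, bL.length) 0 = _
  have hok : OkSB PySem.Dict.empty [] [((aL.length, bL.length), false)] := by
    refine ⟨by simp, trivial⟩
  have hmg : MGB aL bL PySem.Dict.empty := by
    intro p v hv
    rw [PySem.Dict.get?_empty] at hv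
    cases hv
  obtain ⟨m1, -, m3⟩ := loop_main aL bL [((aL.length, bL.length), false)] PySem.Dict.empty hok hmg
  have hsome := m3 ((aL.length, bL.length), false) (by simp)
  obtain ⟨v, hv⟩ := Option.isSome_iff_exists.mp hsome
  rw [PySem.Dict.getD_of_get?_eq_some _ 0 hv]
  exact m1 _ v hv

theorem fold_four (x : List (List (List String))) :
    ∀ c : Int, x.foldl (fun cost ins => cost + inscostFn (some ins) none) c = c + 4 * (x.length : Int) := by
  induction x with
  | nil => intro c; norm_num
  | cons y ys ih =>
    intro c
    rw [List.foldl_cons, ih, inscost_some_none, List.length_cons]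
    push_cast
    ring


-- ===== VERDICT (by name: the statement is the Claim_ definition above) =====
theorem blkcost_spec : Claim_equal_blkcost := by
  intro a b _ _
  unfold Spec_blkcost
  match a, b with
  | none, none => rfl
  | none, some x =>
    show x.foldl (fun cost ins => cost + inscostFn (some ins) none) 0 = 4 * (x.length : Int)
    rw [fold_four]; ring
  | some x, none =>
    show x.foldl (fun cost ins => cost + inscostFn (some ins) none) 0 = 4 * (x.length : Int)
    rw [fold_four]; ring
  | some aL, some bL =>
    show blkcost (some aL) (some bL) = blkcost_alt (some aL) (some bL)
    rw [alt_some_some]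
    exact distanceA_eq aL bL
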